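-- pv_equiv track=rewrite | github.com/kdcube/kdcube-ai-app | app/ai-app/src/kdcube-ai-app/kdcube_ai_app/apps/knowledge_base/modules/segmentation.py | _detect_sibling_issues
-- ===== SOURCE A (Python) =====
-- from typing import Dict, Any, List, Optional, Tuple
--
-- def _detect_sibling_issues(numbered_sections: List[Tuple[str, str, int]]) -> bool:
--     """Detect if numbered sections have incorrect sibling relationships."""
--     # Group by section depth
--     by_depth = {}
--     for section_num, heading, level in numbered_sections:
--         depth = section_num.count('.')
--         if depth not in by_depth:
--             by_depth[depth] = []
--         by_depth[depth].append((section_num, heading, level))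
--
--     # Check if sections at the same depth have different levels
--     for depth, sections in by_depth.items():
--         if len(sections) > 1:
--             levels = [level for _, _, level in sections]
--             if len(set(levels)) > 1:
--                 return True  # Same depth but different levels = sibling issue
--
--     return False
-- ===== SOURCE B (Python) =====
-- from typing import List, Tuple
--
-- def _detect_sibling_issues(numbered_sections: List[Tuple[str, str, int]]) -> bool:
--     """One pass: remember only the first level seen at each depth; report an
--     issue as soon as some section's level differs from the first one at its depth."""
--     first_level = {}
--     for section_num, heading, level in numbered_sections:
--         depth = section_num.count('.')
--         if depth in first_level:
--             if first_level[depth] != level: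
--                 return True
--         else:
--             first_level[depth] = level
--     return False
-- ===== Notes on version B (the rewrite author's own statement) =====
-- stated objective: simpler
-- what changed: Instead of grouping sections into per-depth lists and then scanning each group's level set, B makes a single pass keeping only the first level seen per depth and returns True immediately on the first mismatch.
import Mathlib
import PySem

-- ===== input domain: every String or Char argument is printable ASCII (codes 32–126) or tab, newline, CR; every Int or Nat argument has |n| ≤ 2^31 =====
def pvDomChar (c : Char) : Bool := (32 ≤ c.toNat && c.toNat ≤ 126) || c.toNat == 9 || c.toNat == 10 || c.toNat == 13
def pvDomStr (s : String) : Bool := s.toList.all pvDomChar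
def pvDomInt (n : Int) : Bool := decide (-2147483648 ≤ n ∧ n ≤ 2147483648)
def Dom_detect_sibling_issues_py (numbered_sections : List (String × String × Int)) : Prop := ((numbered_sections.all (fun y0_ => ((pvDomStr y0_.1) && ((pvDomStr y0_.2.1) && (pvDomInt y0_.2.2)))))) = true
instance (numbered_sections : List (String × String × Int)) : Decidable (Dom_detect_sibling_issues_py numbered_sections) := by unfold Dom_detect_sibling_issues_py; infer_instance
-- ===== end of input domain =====

-- B replaces A's group-into-per-depth-lists-then-scan-level-sets by a single pass that keeps
-- only the first level seen at each depth and returns True on the first mismatch (objective: simpler).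

-- ===== PORT A =====
-- A: group sections by depth (= section_num.count('.')) into a dict of lists, then scan
-- each group for more than one distinct level.
def detect_sibling_issues_py (numbered_sections : List (String × String × Int)) : Bool :=
  let by_depth : PySem.Dict Int (List (String × String × Int)) :=
    numbered_sections.foldl (fun d x =>
      let depth : Int := (PySem.Str.count x.1 "." : Int)
      let d := if d.contains depth then d else d.insert depth []
      d.modify depth [] (fun ss => ss ++ [x])) PySem.Dict.empty
  -- 'for depth, sections in by_depth.items(): if …: return True' / 'return False' = any over items
  by_depth.items.any (fun kv =>
    decide (1 < kv.2.length) &&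
      decide (1 < (PySem.Set.ofList (kv.2.map (fun t => t.2.2))).length))

-- ===== PORT B =====
-- B's loop with early return, as structural recursion over the list; fl = first level per depth
def pvAltGo (fl : PySem.Dict Int Int) : List (String × String × Int) → Bool
  | [] => false
  | x :: rest =>
    let depth : Int := (PySem.Str.count x.1 "." : Int)
    match fl.get? depth with
    | some l0 => if l0 ≠ x.2.2 then true else pvAltGo fl rest
    | none => pvAltGo (fl.insert depth x.2.2) rest

def detect_sibling_issues_py_alt (numbered_sections : List (String × String × Int)) : Bool :=
  pvAltGo PySem.Dict.empty numbered_sections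

-- ===== PRECONDITION & SPEC =====
def Spec_detect_sibling_issues_py (numbered_sections : List (String × String × Int)) (out : Bool) : Prop := out = detect_sibling_issues_py_alt numbered_sections
instance (numbered_sections : List (String × String × Int)) (out : Bool) : Decidable (Spec_detect_sibling_issues_py numbered_sections out) := by unfold Spec_detect_sibling_issues_py; infer_instance

-- ===== CLAIM (what is proved, stated in full; the proofs are below) =====
def Claim_equal_detect_sibling_issues_py : Prop := ∀ (numbered_sections : List (String × String × Int)), Dom_detect_sibling_issues_py numbered_sections → Spec_detect_sibling_issues_py numbered_sections (detect_sibling_issues_py numbered_sections)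

-- ===== LEMMAS AND PROOFS =====

-- abbreviations for the proofs
def pvDep (x : String × String × Int) : Int := (PySem.Str.count x.1 "." : Nat)
def pvLvl (x : String × String × Int) : Int := x.2.2
-- A's grouping step
def pvStep (d : PySem.Dict Int (List (String × String × Int))) (x : String × String × Int) :
    PySem.Dict Int (List (String × String × Int)) :=
  let d' := if d.contains (pvDep x) then d else d.insert (pvDep x) []
  d'.modify (pvDep x) [] (fun ss => ss ++ [x])
-- first level among elements of xs at depth k
def pvFirstLvl (xs : List (String × String × Int)) (k : Int) : Option Int :=
  ((xs.filter (fun y => pvDep y = k)).head?).map pvLvl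
-- the common characterisation: two sections with equal depth and different levels
def pvBad (xs : List (String × String × Int)) : Prop :=
  ∃ x ∈ xs, ∃ y ∈ xs, pvDep x = pvDep y ∧ pvLvl x ≠ pvLvl y

lemma pvFirstLvl_cons (x : String × String × Int) (rest : List (String × String × Int)) (k : Int) :
    pvFirstLvl (x :: rest) k = if pvDep x = k then some (pvLvl x) else pvFirstLvl rest k := by
  by_cases h : pvDep x = k <;> simp [pvFirstLvl, h]

lemma pvStep_getD (d : PySem.Dict Int (List (String × String × Int))) (x : String × String × Int) (k : Int) :
    (pvStep d x).getD k [] = if pvDep x = k then d.getD k [] ++ [x] else d.getD k [] := by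
  unfold pvStep
  by_cases hk : pvDep x = k
  · subst hk
    by_cases hc : d.contains (pvDep x)
    · simp [hc, PySem.Dict.getD_modify_self]
    · simp only [Bool.not_eq_true] at hc
      simp [hc, PySem.Dict.getD_modify_self, PySem.Dict.getD_insert_self,
        PySem.Dict.getD_of_not_contains d _ hc]
  · by_cases hc : d.contains (pvDep x) <;>
      simp [hc, hk, PySem.Dict.getD_modify_of_ne _ _ _ (Ne.symm hk),
        PySem.Dict.getD_insert_of_ne _ _ _ (Ne.symm hk)]

lemma pvStep_keys (d : PySem.Dict Int (List (String × String × Int))) (x : String × String × Int) :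
    (pvStep d x).keys = if d.contains (pvDep x) then d.keys else d.keys ++ [pvDep x] := by
  unfold pvStep
  by_cases hc : d.contains (pvDep x)
  · simp [hc, PySem.Dict.keys_modify, PySem.Dict.keys_insert_of_contains d _ hc]
  · simp only [Bool.not_eq_true] at hc
    have h2 : (d.insert (pvDep x) ([] : List (String × String × Int))).contains (pvDep x) = true := by
      rw [PySem.Dict.contains_insert]; simp
    simp [hc, PySem.Dict.keys_modify, PySem.Dict.keys_insert_of_contains _ _ h2,
      PySem.Dict.keys_insert_of_not_contains d _ hc]

lemma pvFoldl_getD (xs : List (String × String × Int)) (d : PySem.Dict Int (List (String × String × Int))) (k : Int) :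
    (xs.foldl pvStep d).getD k [] = d.getD k [] ++ xs.filter (fun x => pvDep x = k) := by
  induction xs generalizing d with
  | nil => simp
  | cons x rest ih =>
    simp only [List.foldl_cons, ih, pvStep_getD, List.filter_cons]
    by_cases hk : pvDep x = k <;> simp [hk]

lemma pvFoldl_mem_keys (xs : List (String × String × Int)) (d : PySem.Dict Int (List (String × String × Int))) (k : Int) :
    k ∈ (xs.foldl pvStep d).keys ↔ k ∈ d.keys ∨ ∃ x ∈ xs, pvDep x = k := by
  induction xs generalizing d with
  | nil => simp
  | cons x rest ih =>
    rw [List.foldl_cons, ih, pvStep_keys]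
    by_cases hc : d.contains (pvDep x)
    · rw [if_pos hc]
      have hx := (PySem.Dict.contains_iff_mem_keys d (pvDep x)).mp hc
      constructor
      · rintro (h | ⟨y, hy, hk⟩)
        · exact Or.inl h
        · exact Or.inr ⟨y, List.mem_cons_of_mem _ hy, hk⟩
      · rintro (h | ⟨y, hy, hk⟩)
        · exact Or.inl h
        · rcases List.mem_cons.mp hy with rfl | hy'
          · exact Or.inl (hk ▸ hx)
          · exact Or.inr ⟨y, hy', hk⟩
    · rw [if_neg hc]
      constructor
      · rintro (h | ⟨y, hy, hk⟩)
        · rcases List.mem_append.mp h with h' | h'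
          · exact Or.inl h'
          · exact Or.inr ⟨x, List.mem_cons_self, (List.mem_singleton.mp h').symm⟩
        · exact Or.inr ⟨y, List.mem_cons_of_mem _ hy, hk⟩
      · rintro (h | ⟨y, hy, hk⟩)
        · exact Or.inl (List.mem_append.mpr (Or.inl h))
        · rcases List.mem_cons.mp hy with rfl | hy'
          · exact Or.inl (List.mem_append.mpr (Or.inr (List.mem_singleton.mpr hk.symm)))
          · exact Or.inr ⟨y, hy', hk⟩

lemma pvFoldl_nodup_keys (xs : List (String × String × Int)) (d : PySem.Dict Int (List (String × String × Int)))
    (hd : d.keys.Nodup) : (xs.foldl pvStep d).keys.Nodup := by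
  induction xs generalizing d with
  | nil => exact hd
  | cons x rest ih =>
    rw [List.foldl_cons]
    refine ih _ ?_
    rw [pvStep_keys]
    by_cases hc : d.contains (pvDep x)
    · simpa [hc] using hd
    · rw [if_neg hc]
      simp only [Bool.not_eq_true] at hc
      refine List.Nodup.append hd (List.nodup_singleton _) ?_
      intro a ha hb
      rw [List.mem_singleton] at hb
      subst hb
      rw [← PySem.Dict.contains_iff_mem_keys] at ha
      rw [ha] at hc
      cases hc

-- a list with two distinct members has length > 1
lemma pv_two_mem_length {α : Type} {l : List α} {a b : α} (ha : a ∈ l) (hb : b ∈ l) (hne : a ≠ b) :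
    1 < l.length := by
  match l with
  | [] => cases ha
  | [z] =>
    simp only [List.mem_singleton] at ha hb
    exact absurd (ha.trans hb.symm) hne
  | _ :: _ :: _ => simp

lemma pvSet_two (zs : List Int) :
    1 < (PySem.Set.ofList zs).length ↔ ∃ b ∈ zs, ∃ c ∈ zs, b ≠ c := by
  constructor
  · intro h
    match hS : PySem.Set.ofList zs with
    | [] => simp [hS] at h
    | [_] => simp [hS] at h
    | s0 :: s1 :: tl =>
      have hnd := PySem.Set.nodup_ofList zs
      rw [hS] at hnd
      have hne : s0 ≠ s1 := by
        have h1 := (List.nodup_cons.mp hnd).1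
        intro he
        exact h1 (by rw [he]; exact List.mem_cons_self)
      have h0 : s0 ∈ zs := (PySem.Set.mem_ofList zs s0).mp (by rw [hS]; exact List.mem_cons_self)
      have h1 : s1 ∈ zs := (PySem.Set.mem_ofList zs s1).mp
        (by rw [hS]; exact List.mem_cons_of_mem _ List.mem_cons_self)
      exact ⟨s0, h0, s1, h1, hne⟩
  · rintro ⟨b, hb, c, hc, hne⟩
    exact pv_two_mem_length ((PySem.Set.mem_ofList zs b).mpr hb)
      ((PySem.Set.mem_ofList zs c).mpr hc) hne

-- A returns true exactly on pvBad
lemma pvA_char (ns : List (String × String × Int)) :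
    detect_sibling_issues_py ns = true ↔ pvBad ns := by
  have hfold : detect_sibling_issues_py ns =
      (ns.foldl pvStep PySem.Dict.empty).items.any (fun kv =>
        decide (1 < kv.2.length) &&
          decide (1 < (PySem.Set.ofList (kv.2.map (fun t => t.2.2))).length)) := rfl
  have hnd : (ns.foldl pvStep PySem.Dict.empty).keys.Nodup :=
    pvFoldl_nodup_keys ns _ (by rw [PySem.Dict.keys_empty]; exact List.nodup_nil)
  have hitems := PySem.Dict.items_eq_map_keys _ hnd ([] : List (String × String × Int))
  rw [hfold, hitems]
  simp only [List.any_map, List.any_eq_true, Function.comp, Bool.and_eq_true, decide_eq_true_eq]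
  constructor
  · rintro ⟨k, hk, _, hset⟩
    rw [pvSet_two] at hset
    obtain ⟨b, hb, c, hc, hbc⟩ := hset
    simp only [List.mem_map] at hb hc
    obtain ⟨xb, hxb, rfl⟩ := hb
    obtain ⟨xc, hxc, rfl⟩ := hc
    rw [pvFoldl_getD, PySem.Dict.getD_empty, List.nil_append] at hxb hxc
    have hxb' := List.mem_filter.mp hxb
    have hxc' := List.mem_filter.mp hxc
    have hdb : pvDep xb = k := of_decide_eq_true hxb'.2
    have hdc : pvDep xc = k := of_decide_eq_true hxc'.2
    exact ⟨xb, hxb'.1, xc, hxc'.1, hdb.trans hdc.symm, hbc⟩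
  · rintro ⟨x, hx, y, hy, hdep, hlvl⟩
    refine ⟨pvDep x, (pvFoldl_mem_keys ns _ _).mpr (Or.inr ⟨x, hx, rfl⟩), ?_⟩
    rw [pvFoldl_getD, PySem.Dict.getD_empty, List.nil_append]
    have hxm : x ∈ ns.filter (fun z => pvDep z = pvDep x) :=
      List.mem_filter.mpr ⟨hx, by simp⟩
    have hym : y ∈ ns.filter (fun z => pvDep z = pvDep x) :=
      List.mem_filter.mpr ⟨hy, by simp [hdep.symm]⟩
    have hxy : x ≠ y := fun h => hlvl (h ▸ rfl)
    refine ⟨pv_two_mem_length hxm hym hxy, ?_⟩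
    rw [pvSet_two]
    exact ⟨pvLvl x, List.mem_map.mpr ⟨x, hxm, rfl⟩, pvLvl y, List.mem_map.mpr ⟨y, hym, rfl⟩, hlvl⟩

-- B's loop invariant: it returns false iff every element's level matches the first level at
-- its depth, where "first" is taken from fl if present, else from the first matching element of xs
lemma pvB_char (xs : List (String × String × Int)) (fl : PySem.Dict Int Int) :
    pvAltGo fl xs = false ↔
      ∀ x ∈ xs, ((fl.get? (pvDep x)).or (pvFirstLvl xs (pvDep x))) = some (pvLvl x) := by
  induction xs generalizing fl with
  | nil => simp [pvAltGo]
  | cons x rest ih =>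
    cases hget : fl.get? (pvDep x) with
    | some l0 =>
      have hdep : ((PySem.Str.count x.1 "." : Nat) : Int) = pvDep x := rfl
      have hstep : pvAltGo fl (x :: rest) = if l0 ≠ pvLvl x then true else pvAltGo fl rest := by
        simp only [pvAltGo, hdep, hget, pvLvl]
        rfl
      by_cases hl : l0 = pvLvl x
      · subst hl
        have hcong : ∀ y ∈ rest,
            ((fl.get? (pvDep y)).or (pvFirstLvl (x :: rest) (pvDep y))) =
              ((fl.get? (pvDep y)).or (pvFirstLvl rest (pvDep y))) := by
          intro y _
          rw [pvFirstLvl_cons]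
          by_cases hk : pvDep x = pvDep y
          · rw [if_pos hk]
            cases hgy : fl.get? (pvDep y) with
            | some v => rfl
            | none => rw [hk, hgy] at hget; cases hget
          · rw [if_neg hk]
        rw [hstep, if_neg (by simp), ih]
        constructor
        · intro h y hy
          rcases List.mem_cons.mp hy with rfl | hy'
          · rw [hget]; rfl
          · rw [hcong y hy']; exact h y hy'
        · intro h y hy
          rw [← hcong y hy]
          exact h y (List.mem_cons_of_mem _ hy)
      · rw [hstep, if_pos hl]
        refine iff_of_false (by simp) ?_
        intro h
        have hx := h x List.mem_cons_self
        rw [hget] at hx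
        exact hl (Option.some.inj hx)
    | none =>
      have hdep : ((PySem.Str.count x.1 "." : Nat) : Int) = pvDep x := rfl
      have hstep : pvAltGo fl (x :: rest) = pvAltGo (fl.insert (pvDep x) (pvLvl x)) rest := by
        simp only [pvAltGo, hdep, hget, pvLvl]
      have hfirst : pvFirstLvl (x :: rest) (pvDep x) = some (pvLvl x) := by
        rw [pvFirstLvl_cons, if_pos rfl]
      have hcong : ∀ y ∈ rest,
          (((fl.insert (pvDep x) (pvLvl x)).get? (pvDep y)).or (pvFirstLvl rest (pvDep y))) =
            ((fl.get? (pvDep y)).or (pvFirstLvl (x :: rest) (pvDep y))) := by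
        intro y _
        by_cases hk : pvDep y = pvDep x
        · rw [hk, PySem.Dict.get?_insert_self, hget, Option.none_or, pvFirstLvl_cons, if_pos rfl]
          rfl
        · rw [PySem.Dict.get?_insert_of_ne _ _ hk, pvFirstLvl_cons,
            if_neg (fun h => hk h.symm)]
      rw [hstep, ih]
      constructor
      · intro h y hy
        rcases List.mem_cons.mp hy with rfl | hy'
        · rw [hget, Option.none_or, hfirst]
        · rw [← hcong y hy']; exact h y hy'
      · intro h y hy
        rw [hcong y hy]
        exact h y (List.mem_cons_of_mem _ hy)

-- the bridge: "every element matches the first level at its depth" = ¬ pvBad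
lemma pvBridge (ns : List (String × String × Int)) :
    (∀ x ∈ ns, pvFirstLvl ns (pvDep x) = some (pvLvl x)) ↔ ¬ pvBad ns := by
  constructor
  · rintro h ⟨x, hx, y, hy, hdep, hlvl⟩
    have hx' := h x hx
    have hy' := h y hy
    rw [← hdep] at hy'
    exact hlvl (Option.some.inj (hx'.symm.trans hy'))
  · intro h x hx
    have hxm : x ∈ ns.filter (fun z => pvDep z = pvDep x) :=
      List.mem_filter.mpr ⟨hx, by simp⟩
    cases hh : (ns.filter (fun z => pvDep z = pvDep x)).head? with
    | none => rw [List.head?_eq_none_iff] at hh; rw [hh] at hxm; cases hxm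
    | some z =>
      have hz : z ∈ ns.filter (fun z => pvDep z = pvDep x) := List.mem_of_mem_head? hh
      have hz' := List.mem_filter.mp hz
      have hzd : pvDep z = pvDep x := of_decide_eq_true hz'.2
      have hlz : pvLvl x = pvLvl z := by
        by_contra hne
        exact h ⟨x, hx, z, hz'.1, hzd.symm, hne⟩
      unfold pvFirstLvl
      rw [hh, Option.map_some, hlz]

-- ===== VERDICT (by name: the statement is the Claim_ definition above) =====
theorem detect_sibling_issues_py_spec : Claim_equal_detect_sibling_issues_py := by
  intro ns _
  unfold Spec_detect_sibling_issues_py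
  have hA := pvA_char ns
  have hB := pvB_char ns PySem.Dict.empty
  simp only [PySem.Dict.get?_empty, Option.none_or] at hB
  have hB' : detect_sibling_issues_py_alt ns = false ↔ ¬ pvBad ns := by
    rw [detect_sibling_issues_py_alt, hB, pvBridge]
  by_cases h : pvBad ns
  · rw [hA.mpr h]
    cases hb : detect_sibling_issues_py_alt ns
    · exact absurd (hB'.mp hb) (not_not.mpr h)
    · rfl
  · have h1 : detect_sibling_issues_py ns = false := by
      cases ha : detect_sibling_issues_py ns
      · rfl
      · exact absurd (hA.mp ha) h
    rw [h1, (hB'.mpr h)]
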